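/- GENERATED by c/gen_decode.py: decode facts of the image, one per distinct instruction byte string. -/
import UserX.DecodeImage

#decode_all Gif.Dec
  "0f8416010000"  -- je 10884b
  "0f844e010000"  -- je 108834
  "0f849b000000"  -- je 10961e
  "0f84d7000000"  -- je 108315
  "0f8593000000"  -- jne 108f8b
  "0f8e01010000"  -- jle 10836a
  "0f8feffeffff"  -- jg 1058a9
  "0f9fc0"  -- setg al
  "0fb6442414"  -- movzx eax,BYTE PTR [rsp+0x14]
  "0fb67301"  -- movzx esi,BYTE PTR [rbx+0x1]
  "39c3"  -- cmp ebx,eax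
  "3d00100000"  -- cmp eax,0x1000
  "410f94c5"  -- sete r13b
  "4139c4"  -- cmp r12d,eax
  "4183c601"  -- add r14d,0x1
  "4183fe01"  -- cmp r14d,0x1
  "41894620"  -- mov DWORD PTR [r14+0x20],eax
  "4189c5"  -- mov r13d,eax
  "418b3424"  -- mov esi,DWORD PTR [r12]
  "418b4620"  -- mov eax,DWORD PTR [r14+0x20]
  "418b742450"  -- mov esi,DWORD PTR [r12+0x50]
  "41be01000000"  -- mov r14d,0x1
  "41c70702100000"  -- mov DWORD PTR [r15],0x1002
  "41c7450066000000"  -- mov DWORD PTR [r13+0x0],0x66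
  "41c784240400c00000f3f3f3"  -- mov DWORD PTR [r12+0xc00004],0xf3f3f300
  "41c7860000c000f1f1f1f1"  -- mov DWORD PTR [r14+0xc00000],0xf1f1f1f1
  "440fb66b01"  -- movzx r13d,BYTE PTR [rbx+0x1]
  "440fb67c2430"  -- movzx r15d,BYTE PTR [rsp+0x30]
  "44887b10"  -- mov BYTE PTR [rbx+0x10],r15b
  "44897310"  -- mov DWORD PTR [rbx+0x10],r14d
  "4489e6"  -- mov esi,r12d
  "4489f3"  -- mov ebx,r14d
  "448b642414"  -- mov r12d,DWORD PTR [rsp+0x14]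
  "448b7520"  -- mov r14d,DWORD PTR [rbp+0x20]
  "448d7d01"  -- lea r15d,[rbp+0x1]
  "4584ed"  -- test r13b,r13b
  "4588742408"  -- mov BYTE PTR [r12+0x8],r14b
  "4589661c"  -- mov DWORD PTR [r14+0x1c],r12d
  "458b7e14"  -- mov r15d,DWORD PTR [r14+0x14]
  "480faff1"  -- imul rsi,rcx
  "4839f2"  -- cmp rdx,rsi
  "4863ed"  -- movsxd rbp,ebp
  "48837b4800"  -- cmp QWORD PTR [rbx+0x48],0x0
  "4883c458"  -- add rsp,0x58
  "4883ec60"  -- sub rsp,0x60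
  "48896b08"  -- mov QWORD PTR [rbx+0x8],rbp
  "4889c3"  -- mov rbx,rax
  "4889eb"  -- mov rbx,rbp
  "488b4c2418"  -- mov rcx,QWORD PTR [rsp+0x18]
  "488b6b48"  -- mov rbp,QWORD PTR [rbx+0x48]
  "488b7b08"  -- mov rdi,QWORD PTR [rbx+0x8]
  "488b7d18"  -- mov rdi,QWORD PTR [rbp+0x18]
  "488d3c9d00131400"  -- lea rdi,[rbx*4+0x141300]
  "488d6b48"  -- lea rbp,[rbx+0x48]
  "488d7330"  -- lea rsi,[rbx+0x30]
  "488d7801"  -- lea rdi,[rax+0x1]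
  "488d7b18"  -- lea rdi,[rbx+0x18]
  "488d7b38"  -- lea rdi,[rbx+0x38]
  "488d7d04"  -- lea rdi,[rbp+0x4]
  "488d7d48"  -- lea rdi,[rbp+0x48]
  "488d7f68"  -- lea rdi,[rdi+0x68]
  "48c1e503"  -- shl rbp,0x3
  "48c7434000000000"  -- mov QWORD PTR [rbx+0x40],0x0
  "48c744240880151400"  -- mov QWORD PTR [rsp+0x8],0x141580
  "48c744241080611000"  -- mov QWORD PTR [rsp+0x10],0x106180
  "48c7442410b38ab541"  -- mov QWORD PTR [rsp+0x10],0x41b58ab3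
  "48c7442450b38ab541"  -- mov QWORD PTR [rsp+0x50],0x41b58ab3
  "48c7455800000000"  -- mov QWORD PTR [rbp+0x58],0x0
  "49035c2448"  -- add rbx,QWORD PTR [r12+0x48]
  "4963c7"  -- movsxd rax,r15d
  "4983c401"  -- add r12,0x1
  "4989c7"  -- mov r15,rax
  "498b442448"  -- mov rax,QWORD PTR [r12+0x48]
  "498d2c1f"  -- lea rbp,[r15+rbx*1]
  "498d7c2404"  -- lea rdi,[r12+0x4]
  "498d7c2428"  -- lea rdi,[r12+0x28]
  "498d7d02"  -- lea rdi,[r13+0x2]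
  "498d7e10"  -- lea rdi,[r14+0x10]
  "498d7f01"  -- lea rdi,[r15+0x1]
  "49c7450000000000"  -- mov QWORD PTR [r13+0x0],0x0
  "4b8d2c26"  -- lea rbp,[r14+r12*1]
  "4c63e3"  -- movsxd r12,ebx
  "4c897338"  -- mov QWORD PTR [rbx+0x38],r14
  "4c89f3"  -- mov rbx,r14
  "4c8b6340"  -- mov r12,QWORD PTR [rbx+0x40]
  "4c8b7318"  -- mov r14,QWORD PTR [rbx+0x18]
  "4c8b7c2418"  -- mov r15,QWORD PTR [rsp+0x18]
  "4c8d6340"  -- lea r12,[rbx+0x40]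
  "4d85c0"  -- test r8,r8
  "4d8b6540"  -- mov r12,QWORD PTR [r13+0x40]
  "72c4"  -- jb 107dc3
  "7413"  -- je 106d32
  "7433"  -- je 1098c3
  "744a"  -- je 1065a8
  "7467"  -- je 109dc0
  "74c8"  -- je 108ea5
  "750e"  -- jne 105cc3
  "752e"  -- jne 109b16
  "75c6"  -- jne 105d9e
  "7d76"  -- jge 10688e
  "7edf"  -- jle 106314
  "7f9d"  -- jg 1054f5
  "837b180c"  -- cmp DWORD PTR [rbx+0x18],0xc
  "83e008"  -- and eax,0x8
  "83f908"  -- cmp ecx,0x8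
  "8844240f"  -- mov BYTE PTR [rsp+0xf],al
  "8944242c"  -- mov DWORD PTR [rsp+0x2c],eax
  "896b20"  -- mov DWORD PTR [rbx+0x20],ebp
  "89d6"  -- mov esi,edx
  "89f0"  -- mov eax,esi
  "8b442410"  -- mov eax,DWORD PTR [rsp+0x10]
  "8b542410"  -- mov edx,DWORD PTR [rsp+0x10]
  "8b6d00"  -- mov ebp,DWORD PTR [rbp+0x0]
  "8d5001"  -- lea edx,[rax+0x1]
  "ba03000000"  -- mov edx,0x3
  "baffffffff"  -- mov edx,0xffffffff
  "bf18000000"  -- mov edi,0x18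
  "c6430102"  -- mov BYTE PTR [rbx+0x1],0x2
  "c74308ffffffff"  -- mov DWORD PTR [rbx+0x8],0xffffffff
  "c7436000000000"  -- mov DWORD PTR [rbx+0x60],0x0
  "c7450000000000"  -- mov DWORD PTR [rbp+0x0],0x0
  "c7456069000000"  -- mov DWORD PTR [rbp+0x60],0x69
  "c7830400c00002f3f3f3"  -- mov DWORD PTR [rbx+0xc00004],0xf3f3f302
  "d3e7"  -- shl edi,cl
  "e802b3ffff"  -- call 100800
  "e80789ffff"  -- call 100800
  "e80cfdffff"  -- call 105240
  "e8109cffff"  -- call 103200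
  "e813f9ffff"  -- call 105f20
  "e817fdffff"  -- call 106540
  "e81f5fffff"  -- call 100640
  "e82360ffff"  -- call 100800
  "e826fbffff"  -- call 10a460
  "e82a99ffff"  -- call 100640
  "e82dafffff"  -- call 103800
  "e8315affff"  -- call 100300
  "e832adffff"  -- call 100640
  "e835fbffff"  -- call 10a460
  "e839fdffff"  -- call 105f20
  "e83fafffff"  -- call 103800
  "e842a5ffff"  -- call 100300
  "e8465affff"  -- call 1008e0
  "e847d1ffff"  -- call 106020
  "e84aebffff"  -- call 107a80
  "e85159ffff"  -- call 1008e0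
  "e85473ffff"  -- call 1008e0
  "e85978ffff"  -- call 100800
  "e85f9affff"  -- call 103800
  "e865aeffff"  -- call 100640
  "e8699fffff"  -- call 100800
  "e86c71ffff"  -- call 100640
  "e86ffeffff"  -- call 105240
  "e875bfffff"  -- call 105f20
  "e879aeffff"  -- call 100800
  "e87f9affff"  -- call 100720
  "e8876effff"  -- call 100720
  "e88a7affff"  -- call 100720
  "e88cfeffff"  -- call 107da0
  "e894aeffff"  -- call 100800
  "e89985ffff"  -- call 1008e0
  "e89ef8ffff"  -- call 108080
  "e8a574ffff"  -- call 1003c0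
  "e8a89affff"  -- call 101440
  "e8ad68ffff"  -- call 1008e0
  "e8af78ffff"  -- call 100720
  "e8b363ffff"  -- call 1008e0
  "e8b758ffff"  -- call 100720
  "e8b99effff"  -- call 100720
  "e8bc9cffff"  -- call 100300
  "e8c272ffff"  -- call 100800
  "e8c757ffff"  -- call 100720
  "e8c89affff"  -- call 100640
  "e8ce61ffff"  -- call 100640
  "e8d2b5ffff"  -- call 103200
  "e8d894ffff"  -- call 100300
  "e8dd93ffff"  -- call 1003c0
  "e8e057ffff"  -- call 100720
  "e8e472ffff"  -- call 1008e0
  "e8e9deffff"  -- call 106020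
  "e8ed9affff"  -- call 100640
  "e8f2faffff"  -- call 1052e0
  "e8f8c3ffff"  -- call 105f20
  "e8fdd1ffff"  -- call 106180
  "e926ffffff"  -- jmp 1080f7
  "e940ffffff"  -- jmp 109fc6
  "e962ffffff"  -- jmp 10659d
  "e982fdffff"  -- jmp 1080f7
  "e9b6000000"  -- jmp 106fea
  "e9f1feffff"  -- jmp 10a8ed
  "eb47"  -- jmp 10632d
  "eb9f"  -- jmp 10659d
  "ebb4"  -- jmp 10afdb
  "ebcc"  -- jmp 1080f7
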